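-- pv_equiv track=rewrite | github.com/festalocal/Scrapping | datatourisme/cloud.py | whitelist
-- ===== SOURCE A (Python) =====
-- def whitelist(event_title, list_words):
--     """
--     Cette fonction vérifie si l'événement doit être retenu en fonction du titre.
--     Chaque élément dans list_words est considéré en entier.
--
--     Args:
--         event_title (str): Le titre de l'événement.
--         list_words (list): Une liste de mots ou groupes de mots à vérifier.
--
--     Returns:
--         bool: True si l'événement doit être retenu, False sinon.
--     """
--     lower_event_title = event_title.lower()
--     title_words = lower_event_title.split()
--
--     for word_group in list_words:
--         words = word_group.lower().split()
--         for i in range(len(title_words) - len(words) + 1):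
--             if title_words[i : i + len(words)] == words:
--                 return True
--     return False
-- ===== SOURCE B (Python) =====
-- def whitelist(event_title, list_words):
--     """Group phrases by length: for each distinct phrase length L the set of
--     title word L-grams is built once and every phrase of that length tested
--     against it by hashing, instead of scanning the title per phrase."""
--     title_words = event_title.lower().split()
--     phrases = [tuple(wg.lower().split()) for wg in list_words]
--     for L in {len(p) for p in phrases}:
--         grams = {tuple(title_words[i:i + L]) for i in range(len(title_words) - L + 1)}
--         if any(p in grams for p in phrases if len(p) == L):
--             return True
--     return False
-- ===== Notes on version B (the rewrite author's own statement) =====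
-- stated objective: alternative
-- what changed: Instead of scanning the title per phrase (slice-compare at every position), B stages the work: it splits all phrases up front, collects the distinct phrase lengths, and for each length builds the set of title word n-grams once, reducing every phrase check to one hash-set membership test; it trades the per-phrase scan for per-length set construction (measured ~1.3x at the largest size, below the 1.5x bar).
import Mathlib
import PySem

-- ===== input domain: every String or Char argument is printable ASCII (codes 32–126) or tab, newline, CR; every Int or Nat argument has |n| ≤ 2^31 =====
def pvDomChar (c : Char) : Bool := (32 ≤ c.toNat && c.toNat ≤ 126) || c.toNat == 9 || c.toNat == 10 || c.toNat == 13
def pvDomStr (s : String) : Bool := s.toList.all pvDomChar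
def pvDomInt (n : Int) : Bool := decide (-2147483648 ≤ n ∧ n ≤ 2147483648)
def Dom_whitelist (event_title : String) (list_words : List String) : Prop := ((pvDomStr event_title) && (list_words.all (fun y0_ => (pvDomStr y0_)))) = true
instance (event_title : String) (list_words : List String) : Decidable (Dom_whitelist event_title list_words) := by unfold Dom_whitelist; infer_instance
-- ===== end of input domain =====

-- B stages the work: split all phrases first, then per DISTINCT phrase length build the
-- set of title word n-grams once and test all phrases of that length by set membership.

-- ===== PORT A =====
-- inner 'for i in range(len(title_words) - len(words) + 1): if title_words[i:i+len(words)] == words: return True'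
def whitelistInner (title_words words : List String) : Bool :=
  (PySem.List.pyRange 0 ((title_words.length : Int) - (words.length : Int) + 1) 1).any
    (fun i => PySem.List.slice title_words (some i) (some (i + (words.length : Int))) == words)

-- outer 'for word_group in list_words: …'
def whitelistLoop (title_words : List String) : List String → Bool
  | [] => false
  | wg :: rest =>
    let words := PySem.Str.split₀ (PySem.Str.lower wg)
    if whitelistInner title_words words then true else whitelistLoop title_words rest

def whitelist (event_title : String) (list_words : List String) : Bool :=
  whitelistLoop (PySem.Str.split₀ (PySem.Str.lower event_title)) list_words

-- ===== PORT B =====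
-- '[tuple(wg.lower().split()) for wg in list_words]'
def altPhrases (list_words : List String) : List (List String) :=
  list_words.map (fun wg => PySem.Str.split₀ (PySem.Str.lower wg))

-- '{tuple(title_words[i:i+L]) for i in range(len(title_words)-L+1)}'
def altNgrams (title_words : List String) (L : Int) : PySem.Set (List String) :=
  PySem.Set.ofList
    ((PySem.List.pyRange 0 ((title_words.length : Int) - L + 1) 1).map
      (fun i => PySem.List.slice title_words (some i) (some (i + L))))

-- 'for L in {len(p) for p in phrases}: … if any(p in grams for p in phrases if len(p) == L): return True'
-- (the boolean result of this loop over the set is order-independent: it is an 'any')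
def whitelist_alt (event_title : String) (list_words : List String) : Bool :=
  let title_words := PySem.Str.split₀ (PySem.Str.lower event_title)
  let phrases := altPhrases list_words
  (PySem.Set.ofList (phrases.map (fun p => (p.length : Int)))).any
    (fun L =>
      let grams := altNgrams title_words L
      (phrases.filter (fun p => (p.length : Int) == L)).any
        (fun p => PySem.Set.contains grams p))

-- ===== PRECONDITION & SPEC =====
def Spec_whitelist (event_title : String) (list_words : List String) (out : Bool) : Prop := out = whitelist_alt event_title list_words
instance (event_title : String) (list_words : List String) (out : Bool) : Decidable (Spec_whitelist event_title list_words out) := by unfold Spec_whitelist; infer_instance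

-- ===== CLAIM (what is proved, stated in full; the proofs are below) =====
def Claim_equal_whitelist : Prop := ∀ (event_title : String) (list_words : List String), Dom_whitelist event_title list_words → Spec_whitelist event_title list_words (whitelist event_title list_words)

-- ===== LEMMAS AND PROOFS =====

-- the phrase check is the same test: A's positional scan hits iff the phrase is in the n-gram set
theorem inner_eq_ngram_mem (tw ws : List String) :
    whitelistInner tw ws = PySem.Set.contains (altNgrams tw (ws.length : Int)) ws := by
  rw [Bool.eq_iff_iff]
  simp only [whitelistInner, altNgrams, List.any_eq_true, PySem.Set.contains_iff,
    PySem.Set.mem_ofList, List.mem_map, beq_iff_eq]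

-- A's early-return loop is an 'any' over the split phrases
theorem loop_eq_any (tw : List String) (l : List String) :
    whitelistLoop tw l = (altPhrases l).any (fun p => whitelistInner tw p) := by
  induction l with
  | nil => rfl
  | cons wg rest ih =>
    simp only [whitelistLoop, altPhrases, List.map_cons, List.any_cons]
    by_cases h : whitelistInner tw (PySem.Str.split₀ (PySem.Str.lower wg)) = true
    · rw [if_pos h, h, Bool.true_or]
    · rw [if_neg h, Bool.eq_false_iff.mpr h, Bool.false_or]
      exact ih

-- grouping by distinct length and testing per group is the same 'any' over all phrases
theorem grouped_any (tw : List String) (phrases : List (List String)) :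
    ((PySem.Set.ofList (phrases.map (fun p => (p.length : Int)))).any
      (fun L => (phrases.filter (fun p => (p.length : Int) == L)).any
        (fun p => PySem.Set.contains (altNgrams tw L) p)))
    = phrases.any (fun p => PySem.Set.contains (altNgrams tw (p.length : Int)) p) := by
  rw [Bool.eq_iff_iff]
  simp only [List.any_eq_true, PySem.Set.mem_ofList, List.mem_map, List.mem_filter, beq_iff_eq]
  constructor
  · rintro ⟨L, -, p, ⟨hp, hlen⟩, hc⟩
    exact ⟨p, hp, hlen ▸ hc⟩
  · rintro ⟨p, hp, hc⟩
    exact ⟨(p.length : Int), ⟨p, hp, rfl⟩, p, ⟨hp, rfl⟩, hc⟩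

-- ===== VERDICT (by name: the statement is the Claim_ definition above) =====
theorem whitelist_spec : Claim_equal_whitelist := by
  intro event_title list_words _
  unfold Spec_whitelist whitelist whitelist_alt
  rw [loop_eq_any, grouped_any]
  exact PySem.List.any_congr_mem (fun p _ => inner_eq_ngram_mem _ p)
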